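-- pv_equiv track=rewrite | github.com/JackFrostt21/SIC | For_Denis/conf_with_guid.py | add_guid_to_conf
-- ===== SOURCE A (Python) =====
-- def add_guid_to_conf(config, csv_data):
--     for (
--         id_asterisk,
--         block,
--     ) in (
--         config.items()
--     ):  # id_asterisk — ключ, а block — соответствующее ему значение (список строк)
--         guid = csv_data.get(id_asterisk)  # получаем значение ключа
--         block = [
--             line for line in block if line.strip() != ""
--         ]  # убираем разрыв основного блока в конф файле и новой гуид строки
--         if guid:
--             guid_line = f"guid={guid}"  # создаем строку в которой лежит гуид
--             stroka_guid_yes = any(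
--                 line.startswith("guid=") for line in block
--             )  # проверяем есть ли в блоке строка guid=
--             if stroka_guid_yes:
--                 block = [
--                     line if not line.startswith("guid=") else guid_line
--                     for line in block
--                 ]  # заменяем новой строкой (чтобы не получить дубли)
--             else:
--                 block.append(guid_line)  # добавляем строку
--         else:
--             block = [
--                 line for line in block if not line.startswith("guid=")
--             ]  # если гуида в csv нет, то удалеям в конф
--         config[id_asterisk] = block  # присваиваем новый блок в словарь
--     return config
-- ===== SOURCE B (Python) =====
-- def add_guid_to_conf(config, csv_data):
--     for key in config:
--         # split the block into segments separated by 'guid=' lines,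
--         # dropping blank lines while splitting
--         chunks = []
--         cur = []
--         for line in config[key]:
--             if line.startswith("guid="):
--                 chunks.append(cur)
--                 cur = []
--             elif line.strip():
--                 cur.append(line)
--         chunks.append(cur)
--         guid = csv_data.get(key)
--         if guid:
--             sep = [f"guid={guid}"]
--             if len(chunks) == 1:          # no guid line existed: append it
--                 new = chunks[0] + sep
--             else:                          # rejoin with the guid line as separator
--                 new = chunks[0]
--                 for c in chunks[1:]:
--                     new = new + sep + c
--         else:                              # no guid in csv: plain concatenation
--             new = [line for c in chunks for line in c]
--         config[key] = new
--     return config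
-- ===== Notes on version B (the rewrite author's own statement) =====
-- stated objective: alternative
-- what changed: Replaces A's per-line filter + any-scan + replace/remove comprehensions by a split/join algorithm: each block is split into segments at its 'guid=' lines (blanks dropped while splitting), and the result is the segments rejoined with the guid line as separator, the concatenation of segments when the csv has no guid, or the single segment plus an appended guid line.
import Mathlib
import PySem

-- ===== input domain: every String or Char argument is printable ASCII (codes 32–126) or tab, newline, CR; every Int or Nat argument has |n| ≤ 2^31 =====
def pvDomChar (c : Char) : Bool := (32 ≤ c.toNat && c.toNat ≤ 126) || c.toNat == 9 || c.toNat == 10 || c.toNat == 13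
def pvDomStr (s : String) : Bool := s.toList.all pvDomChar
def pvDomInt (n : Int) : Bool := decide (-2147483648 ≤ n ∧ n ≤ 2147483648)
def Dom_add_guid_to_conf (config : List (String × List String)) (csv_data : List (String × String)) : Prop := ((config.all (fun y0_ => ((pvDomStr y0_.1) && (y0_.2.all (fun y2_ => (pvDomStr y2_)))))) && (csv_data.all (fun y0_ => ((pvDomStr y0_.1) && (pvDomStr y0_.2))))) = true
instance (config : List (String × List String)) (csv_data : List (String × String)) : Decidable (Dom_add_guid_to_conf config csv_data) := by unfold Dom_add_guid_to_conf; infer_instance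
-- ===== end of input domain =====

-- B replaces A's per-block filter + any-scan + replace/remove comprehensions by a split/join
-- algorithm (split the block at 'guid=' lines, rejoin with the guid line as separator);
-- objective: alternative. A mutates the config dict in place; B performs the same mutation,
-- and the equivalence proved here is about the returned value.

-- ===== PORT A =====
-- per-block body of A's loop, on the value csv_data.get(id) and the block's lines
def pvBlockA : Option String → List String → List String
  | none, lines =>
      (lines.filter (fun line => PySem.Str.strip line != "")).filter
        (fun l => !(PySem.Str.startswith l "guid="))
  | some g, lines =>
      let block := lines.filter (fun line => PySem.Str.strip line != "")
      if g ≠ "" then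
        let guid_line := "guid=" ++ g
        if block.any (fun l => PySem.Str.startswith l "guid=") then
          block.map (fun l => if !(PySem.Str.startswith l "guid=") then l else guid_line)
        else block ++ [guid_line]
      else block.filter (fun l => !(PySem.Str.startswith l "guid="))

def add_guid_to_conf (config : List (String × List String)) (csv_data : List (String × String)) : List (String × List String) :=
  config.map (fun kv => (kv.1, pvBlockA ((PySem.Dict.mk csv_data).get? kv.1) kv.2))

-- ===== PORT B =====
-- B's splitting loop: state (chunks, cur); a 'guid=' line closes the current segment,
-- a blank line is dropped, any other line joins the current segment
def pvStep (st : List (List String) × List String) (line : String) : List (List String) × List String :=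
  if PySem.Str.startswith line "guid=" then (st.1 ++ [st.2], [])
  else if PySem.Str.strip line != "" then (st.1, st.2 ++ [line])
  else st

-- per-block body of B's loop: split, then join with separator / append / concatenate
def pvBlockB (o : Option String) (lines : List String) : List String :=
  let st := lines.foldl pvStep ([], [])
  let chunks := st.1 ++ [st.2]
  match o with
  | none => chunks.flatMap id
  | some g =>
      if g ≠ "" then
        let sep := ["guid=" ++ g]
        if chunks.length == 1 then chunks.head! ++ sep
        else chunks.tail.foldl (fun acc c => acc ++ sep ++ c) chunks.head!
      else chunks.flatMap id

def add_guid_to_conf_alt (config : List (String × List String)) (csv_data : List (String × String)) : List (String × List String) :=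
  config.map (fun kv => (kv.1, pvBlockB ((PySem.Dict.mk csv_data).get? kv.1) kv.2))

-- ===== PRECONDITION & SPEC =====
-- Pre_ excludes assoc lists with duplicate keys (in config or csv_data): a Python dict cannot
-- hold duplicate keys, so such lists do not represent any input A receives, and which entry
-- survives is an artefact of the list-to-dict conversion.
def Pre_add_guid_to_conf (config : List (String × List String)) (csv_data : List (String × String)) : Prop :=
  (config.map Prod.fst).Nodup ∧ (csv_data.map Prod.fst).Nodup
instance (config : List (String × List String)) (csv_data : List (String × String)) : Decidable (Pre_add_guid_to_conf config csv_data) := by unfold Pre_add_guid_to_conf; infer_instance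

def pvWitness_add_guid_to_conf : (List (String × List String)) × (List (String × String)) :=
  ([("a", ["guid=old", "", "x=1"]), ("b", ["y=2"])], [("a", "NEW")])

def Spec_add_guid_to_conf (config : List (String × List String)) (csv_data : List (String × String)) (out : List (String × List String)) : Prop := out = add_guid_to_conf_alt config csv_data
instance (config : List (String × List String)) (csv_data : List (String × String)) (out : List (String × List String)) : Decidable (Spec_add_guid_to_conf config csv_data out) := by unfold Spec_add_guid_to_conf; infer_instance

-- ===== CLAIM (what is proved, stated in full; the proofs are below) =====
def Claim_equal_add_guid_to_conf : Prop := ∀ (config : List (String × List String)) (csv_data : List (String × String)), Dom_add_guid_to_conf config csv_data → Pre_add_guid_to_conf config csv_data → Spec_add_guid_to_conf config csv_data (add_guid_to_conf config csv_data)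

-- ===== LEMMAS AND PROOFS =====

-- a line starting with 'guid=' starts with a non-whitespace character, so strip keeps it nonempty
theorem pv_strip_ne_of_guid {l : String} (h : PySem.Str.startswith l "guid=" = true) :
    (PySem.Str.strip l != "") = true := by
  have hpre : "guid=".toList <+: l.toList := by
    rw [← PySem.Chars.startswith_iff]
    simpa using h
  have hg : 'g' ∈ l.toList := hpre.subset (by decide)
  have hmem : ∀ (cs : List Char), 'g' ∈ cs → 'g' ∈ cs.dropWhile PySem.Chars.isspace := by
    intro cs hc
    rw [← List.takeWhile_append_dropWhile (p := PySem.Chars.isspace) (l := cs)] at hc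
    rcases List.mem_append.mp hc with h1 | h1
    · exact absurd (List.mem_takeWhile_imp h1) (by decide)
    · exact h1
  have hne : PySem.Chars.strip l.toList ≠ [] := by
    intro he
    have : 'g' ∈ PySem.Chars.strip l.toList := by
      unfold PySem.Chars.strip PySem.Chars.rstrip PySem.Chars.lstrip
      exact List.mem_reverse.mpr (hmem _ (List.mem_reverse.mpr (hmem _ hg)))
    simp [he] at this
  have hne' : PySem.Str.strip l ≠ "" := by
    intro he
    apply hne
    have := congrArg String.toList he
    simpa [PySem.Str.strip] using this
  simpa using hne'

-- functional (foldr-style) description of B's splitting loop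
def pvCh : List String → List String → List (List String)
  | [], cur => [cur]
  | l :: rest, cur =>
      if PySem.Str.startswith l "guid=" then cur :: pvCh rest []
      else if PySem.Str.strip l != "" then pvCh rest (cur ++ [l])
      else pvCh rest cur

theorem pvCh_cons (l : String) (rest cur : List String) :
    pvCh (l :: rest) cur
      = if PySem.Str.startswith l "guid=" then cur :: pvCh rest []
        else if PySem.Str.strip l != "" then pvCh rest (cur ++ [l])
        else pvCh rest cur := rfl

theorem pvCh_ne_nil (lines cur) : pvCh lines cur ≠ [] := by
  induction lines generalizing cur with
  | nil => simp [pvCh]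
  | cons l rest ih =>
    unfold pvCh
    split_ifs <;> simp_all

theorem pvCh_shape (lines cur) : ∃ c cs, pvCh lines cur = c :: cs := by
  cases h : pvCh lines cur with
  | nil => exact absurd h (pvCh_ne_nil lines cur)
  | cons c cs => exact ⟨c, cs, rfl⟩

-- B's foldl loop computes pvCh
theorem pv_fold_eq (lines : List String) (chunks : List (List String)) (cur : List String) :
    (lines.foldl pvStep (chunks, cur)).1 ++ [(lines.foldl pvStep (chunks, cur)).2]
      = chunks ++ pvCh lines cur := by
  induction lines generalizing chunks cur with
  | nil => simp [pvCh]
  | cons l rest ih =>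
    rw [List.foldl_cons]
    by_cases hm : PySem.Str.startswith l "guid=" = true
    · rw [show pvStep (chunks, cur) l = (chunks ++ [cur], []) from by unfold pvStep; rw [if_pos hm],
        ih, pvCh_cons, if_pos hm, List.append_assoc, List.singleton_append]
    · rw [Bool.not_eq_true] at hm
      by_cases hb : (PySem.Str.strip l != "") = true
      · rw [show pvStep (chunks, cur) l = (chunks, cur ++ [l]) from by
            unfold pvStep; rw [hm, if_neg (by simp), if_pos hb], ih, pvCh_cons, hm,
          if_neg (by simp), if_pos hb]
      · rw [Bool.not_eq_true] at hb
        rw [show pvStep (chunks, cur) l = (chunks, cur) from by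
            unfold pvStep; rw [hm, if_neg (by simp), hb, if_neg (by simp)], ih, pvCh_cons, hm,
          if_neg (by simp), hb, if_neg (by simp)]

-- concatenating the segments = the fused blank-and-guid filter
theorem pv_flatten (lines cur) :
    (pvCh lines cur).flatMap id
      = cur ++ lines.filter (fun l => PySem.Str.strip l != "" && !(PySem.Str.startswith l "guid=")) := by
  induction lines generalizing cur with
  | nil => simp [pvCh]
  | cons l rest ih =>
    rw [pvCh_cons]
    by_cases hm : PySem.Str.startswith l "guid=" = true
    · rw [if_pos hm, List.filter_cons_of_neg (by rw [hm]; simp)]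
      simp [ih]
    · rw [Bool.not_eq_true] at hm
      rw [hm, if_neg (by simp)]
      by_cases hb : (PySem.Str.strip l != "") = true
      · rw [if_pos hb, List.filter_cons_of_pos (by rw [hm, hb]; simp), ih]
        simp
      · rw [Bool.not_eq_true] at hb
        rw [hb, if_neg (by simp), List.filter_cons_of_neg (by rw [hb]; simp), ih]

-- joining the segments with [gl] as separator = A's replace-comprehension over the blank filter
def pvJoinH (gl : String) : List (List String) → List String
  | [] => []
  | c :: cs => c ++ cs.flatMap (fun c => gl :: c)

theorem pv_join (gl : String) (lines cur) :
    pvJoinH gl (pvCh lines cur)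
      = cur ++ (lines.filter (fun line => PySem.Str.strip line != "")).map
          (fun l => if !(PySem.Str.startswith l "guid=") then l else gl) := by
  induction lines generalizing cur with
  | nil => simp [pvCh, pvJoinH]
  | cons l rest ih =>
    rw [pvCh_cons]
    by_cases hm : PySem.Str.startswith l "guid=" = true
    · rw [if_pos hm, List.filter_cons_of_pos (by rw [pv_strip_ne_of_guid hm]), List.map_cons, hm]
      obtain ⟨c, cs, hsh⟩ := pvCh_shape rest []
      rw [hsh]
      have hstep : pvJoinH gl (cur :: c :: cs) = cur ++ gl :: pvJoinH gl (c :: cs) := by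
        simp [pvJoinH]
      rw [hstep, ← hsh, ih]
      simp
    · rw [Bool.not_eq_true] at hm
      rw [hm, if_neg (by simp)]
      by_cases hb : (PySem.Str.strip l != "") = true
      · rw [if_pos hb, List.filter_cons_of_pos (by rw [hb]), List.map_cons, hm, ih]
        simp
      · rw [Bool.not_eq_true] at hb
        rw [hb, if_neg (by simp), List.filter_cons_of_neg (by rw [hb]; simp), ih]

-- B's join loop in closed form
theorem pv_foldl_join (sep : List String) (cs : List (List String)) (acc : List String) :
    cs.foldl (fun a c => a ++ sep ++ c) acc = acc ++ cs.flatMap (fun c => sep ++ c) := by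
  induction cs generalizing acc with
  | nil => simp
  | cons c rest ih => simp [List.flatMap]

-- the number of segments is 1 iff the block has no 'guid=' line
theorem pv_len_one (lines cur) :
    ((pvCh lines cur).length == 1) = !(lines.any (fun l => PySem.Str.startswith l "guid=")) := by
  induction lines generalizing cur with
  | nil => simp [pvCh]
  | cons l rest ih =>
    rw [pvCh_cons, List.any_cons]
    by_cases hm : PySem.Str.startswith l "guid=" = true
    · rw [if_pos hm, hm, Bool.true_or, Bool.not_true]
      obtain ⟨c, cs, hsh⟩ := pvCh_shape rest []
      rw [hsh]
      rw [show ((cur :: c :: cs).length == 1) = (cs.length + 2 == 1) from by simp]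
      rw [beq_eq_false_iff_ne]
      omega
    · rw [Bool.not_eq_true] at hm
      rw [hm, if_neg (by simp), Bool.false_or]
      by_cases hb : (PySem.Str.strip l != "") = true
      · rw [if_pos hb, ih]
      · rw [Bool.not_eq_true] at hb
        rw [hb, if_neg (by simp), ih]

-- A's any-scan over the blank-filtered block = any-scan over the raw block
theorem pv_any_filter (lines : List String) :
    (lines.filter (fun line => PySem.Str.strip line != "")).any
        (fun l => PySem.Str.startswith l "guid=")
      = lines.any (fun l => PySem.Str.startswith l "guid=") := by
  induction lines with
  | nil => simp
  | cons l rest ih =>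
    rw [List.any_cons]
    by_cases hm : PySem.Str.startswith l "guid=" = true
    · rw [List.filter_cons_of_pos (by rw [pv_strip_ne_of_guid hm]), List.any_cons, hm,
        Bool.true_or, Bool.true_or]
    · rw [Bool.not_eq_true] at hm
      by_cases hb : (PySem.Str.strip l != "") = true
      · rw [List.filter_cons_of_pos (by rw [hb]), List.any_cons, hm, Bool.false_or, Bool.false_or,
          ih]
      · rw [Bool.not_eq_true] at hb
        rw [List.filter_cons_of_neg (by rw [hb]; simp), hm, Bool.false_or, ih]

-- A's two successive filters equal the fused single filter
theorem pv_filter_comm (xs : List String) :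
    (xs.filter (fun line => PySem.Str.strip line != "")).filter
        (fun l => !(PySem.Str.startswith l "guid="))
      = xs.filter (fun l => PySem.Str.strip l != "" && !(PySem.Str.startswith l "guid=")) := by
  rw [List.filter_filter]
  exact List.filter_congr (fun l _ => Bool.and_comm _ _)

-- A's per-block body equals B's per-block body
theorem pvBlock_eq (o : Option String) (lines : List String) :
    pvBlockA o lines = pvBlockB o lines := by
  have hchunks : (lines.foldl pvStep ([], [])).1 ++ [(lines.foldl pvStep ([], [])).2]
      = pvCh lines [] := by simpa using pv_fold_eq lines [] []
  have hflatten : (pvCh lines []).flatMap id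
      = lines.filter (fun l => PySem.Str.strip l != "" && !(PySem.Str.startswith l "guid=")) := by
    simpa using pv_flatten lines []
  cases o with
  | none =>
    have hB : pvBlockB none lines = (pvCh lines []).flatMap id := by
      simp only [pvBlockB]
      rw [hchunks]
    rw [hB, hflatten,
      show pvBlockA none lines
          = (lines.filter (fun line => PySem.Str.strip line != "")).filter
              (fun l => !(PySem.Str.startswith l "guid=")) from rfl,
      pv_filter_comm]
  | some g =>
    by_cases hg : g = ""
    · subst hg
      have hB : pvBlockB (some "") lines = (pvCh lines []).flatMap id := by
        simp only [pvBlockB]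
        rw [hchunks, if_neg (by simp)]
      have hA : pvBlockA (some "") lines
          = (lines.filter (fun line => PySem.Str.strip line != "")).filter
              (fun l => !(PySem.Str.startswith l "guid=")) := by
        simp only [pvBlockA]
        rw [if_neg (by simp)]
      rw [hA, hB, hflatten, pv_filter_comm]
    · have hA : pvBlockA (some g) lines
          = (if (lines.filter (fun line => PySem.Str.strip line != "")).any
                (fun l => PySem.Str.startswith l "guid=") then
              (lines.filter (fun line => PySem.Str.strip line != "")).map
                (fun l => if !(PySem.Str.startswith l "guid=") then l else "guid=" ++ g)
            else lines.filter (fun line => PySem.Str.strip line != "") ++ ["guid=" ++ g]) := by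
        simp only [pvBlockA]
        rw [if_pos hg]
      have hB : pvBlockB (some g) lines
          = (if (pvCh lines []).length == 1 then (pvCh lines []).head! ++ ["guid=" ++ g]
            else (pvCh lines []).tail.foldl (fun acc c => acc ++ ["guid=" ++ g] ++ c)
              (pvCh lines []).head!) := by
        simp only [pvBlockB]
        rw [hchunks, if_pos hg]
      rw [hA, hB, pv_any_filter]
      obtain ⟨c, cs, hsh⟩ := pvCh_shape lines []
      by_cases ha : lines.any (fun l => PySem.Str.startswith l "guid=") = true
      · -- some 'guid=' line exists: replacement = join with separator
        have hlen : ((pvCh lines []).length == 1) = false := by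
          rw [pv_len_one, ha, Bool.not_true]
        rw [if_pos ha, hlen, if_neg (by simp), hsh, List.tail_cons, List.head!_cons, pv_foldl_join]
        have hj := pv_join ("guid=" ++ g) lines []
        rw [hsh] at hj
        simpa [pvJoinH] using hj.symm
      · -- no 'guid=' line: single segment, guid line appended
        rw [Bool.not_eq_true] at ha
        have hlen : ((pvCh lines []).length == 1) = true := by
          rw [pv_len_one, ha, Bool.not_false]
        rw [ha, if_neg (by simp), hlen, if_pos rfl, hsh]
        rw [hsh] at hlen
        have hcs : cs = [] := by
          cases cs with
          | nil => rfl
          | cons a t => simp at hlen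
        subst hcs
        rw [List.head!_cons]
        rw [hsh] at hflatten
        have hc : c = lines.filter
            (fun l => PySem.Str.strip l != "" && !(PySem.Str.startswith l "guid=")) := by
          simpa using hflatten
        have hF : lines.filter (fun l => PySem.Str.strip l != "" && !(PySem.Str.startswith l "guid="))
            = lines.filter (fun line => PySem.Str.strip line != "") := by
          apply List.filter_congr
          intro l hl
          have hm : PySem.Str.startswith l "guid=" = false := by
            cases hx : PySem.Str.startswith l "guid=" with
            | false => rfl
            | true =>
              rw [List.any_eq_false] at ha
              exact absurd hx (by simpa using ha l hl)
          rw [hm]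
          simp
        rw [hc, hF]

-- ===== VERDICT (by name: the statement is the Claim_ definition above) =====
theorem add_guid_to_conf_spec : Claim_equal_add_guid_to_conf := by
  intro config csv_data _ _
  unfold Spec_add_guid_to_conf add_guid_to_conf add_guid_to_conf_alt
  exact List.map_congr_left (fun kv _ => by rw [pvBlock_eq])
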